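-- pv_equiv track=rewrite | github.com/JiEung2/TIL | Python/SWEA/15388.py | check
-- ===== SOURCE A (Python) =====
-- def check(card):
--     for i in range(len(card)):
--         if card[i] >= 3:
--             return True
--
--     cnt = 0
--     for i in range(len(card)):
--         if card[i] >= 1:
--             cnt += 1
--         else:
--             cnt = 0
--         if cnt == 3:
--             return True
--     return False
-- ===== SOURCE B (Python) =====
-- def check(card):
--     s = ''.join('3' if c >= 3 else '1' if c >= 1 else '0' for c in card)
--     return '3' in s or '111' in s
-- ===== Notes on version B (the rewrite author's own statement) =====
-- stated objective: alternative
-- what changed: Encodes the hand into a character string ('3' for a card >= 3, '1' for 1..2, '0' otherwise) and decides the answer by two substring searches ('3' in s, '111' in s) instead of A's two index-driven scans with a run counter.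
import Mathlib
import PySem

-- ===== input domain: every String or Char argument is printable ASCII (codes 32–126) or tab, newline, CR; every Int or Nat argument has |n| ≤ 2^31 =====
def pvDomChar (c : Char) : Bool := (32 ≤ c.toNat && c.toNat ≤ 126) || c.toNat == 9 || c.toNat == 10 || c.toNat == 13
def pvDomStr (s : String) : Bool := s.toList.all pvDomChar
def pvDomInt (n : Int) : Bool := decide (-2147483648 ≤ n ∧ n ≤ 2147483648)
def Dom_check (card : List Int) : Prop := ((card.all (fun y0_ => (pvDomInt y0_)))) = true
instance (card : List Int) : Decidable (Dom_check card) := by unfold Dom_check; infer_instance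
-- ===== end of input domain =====

-- B encodes the hand as a character string and answers by two substring searches (objective: alternative).

-- ===== PORT A =====
-- first loop: for i in range(len(card)): if card[i] >= 3: return True
def checkLoop1 : List Int → Bool
  | [] => false
  | c :: rest => if c ≥ 3 then true else checkLoop1 rest

-- second loop: running counter cnt, reset on a card < 1, early return at cnt == 3
def checkLoop2 : List Int → Int → Bool
  | [], _ => false
  | c :: rest, cnt =>
    let cnt' := if c ≥ 1 then cnt + 1 else 0
    if cnt' = 3 then true else checkLoop2 rest cnt'

def check (card : List Int) : Bool :=
  if checkLoop1 card then true else checkLoop2 card 0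

-- ===== PORT B =====
-- s = ''.join('3' if c >= 3 else '1' if c >= 1 else '0' for c in card); return '3' in s or '111' in s
def check_alt (card : List Int) : Bool :=
  let s := PySem.Str.join "" (card.map (fun c => if c ≥ 3 then "3" else if c ≥ 1 then "1" else "0"))
  PySem.Str.isIn "3" s || PySem.Str.isIn "111" s

-- ===== PRECONDITION & SPEC =====
def Spec_check (card : List Int) (out : Bool) : Prop := out = check_alt card
instance (card : List Int) (out : Bool) : Decidable (Spec_check card out) := by unfold Spec_check; infer_instance

-- ===== CLAIM (what is proved, stated in full; the proofs are below) =====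
def Claim_equal_check : Prop := ∀ (card : List Int), Dom_check card → Spec_check card (check card)

-- ===== LEMMAS AND PROOFS =====

-- per-card character of B's encoding (proof-side)
def encChar (c : Int) : Char := if c ≥ 3 then '3' else if c ≥ 1 then '1' else '0'

-- window predicate: three consecutive cards ≥ 1 (characterisation of A's second loop)
def win : List Int → Bool
  | a :: b :: c :: r => (decide (a ≥ 1) && decide (b ≥ 1) && decide (c ≥ 1)) || win (b :: c :: r)
  | _ => false

theorem checkLoop1_eq_any (l : List Int) : checkLoop1 l = l.any (fun c => decide (c ≥ 3)) := by
  induction l with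
  | nil => rfl
  | cons a r ih =>
    by_cases h : a ≥ 3 <;> simp [checkLoop1, h, ih]

-- head-run helpers describing what a pending counter of 1 / 2 still needs
def head1 : List Int → Bool
  | a :: _ => decide (a ≥ 1)
  | _ => false

def head2 : List Int → Bool
  | a :: b :: _ => decide (a ≥ 1) && decide (b ≥ 1)
  | _ => false

theorem win_cons_lt (a : Int) (r : List Int) (h : ¬ a ≥ 1) : win (a :: r) = win r := by
  cases r with
  | nil => simp [win]
  | cons b r2 =>
    cases r2 with
    | nil => simp [win]
    | cons c r3 => simp [win, h]

theorem loop2_inv (l : List Int) :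
    checkLoop2 l 0 = win l ∧ checkLoop2 l 1 = (head2 l || win l) ∧ checkLoop2 l 2 = (head1 l || win l) := by
  induction l with
  | nil => refine ⟨rfl, rfl, rfl⟩
  | cons a r ih =>
    obtain ⟨ih0, ih1, ih2⟩ := ih
    by_cases h : a ≥ 1
    · refine ⟨?_, ?_, ?_⟩
      · have step : checkLoop2 (a :: r) 0 = checkLoop2 r 1 := by norm_num [checkLoop2, h]
        rw [step, ih1]
        cases r with
        | nil => simp [win, head2]
        | cons b r2 =>
          cases r2 with
          | nil => simp [win, head2]
          | cons c r3 => simp [win, head2, h]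
      · have step : checkLoop2 (a :: r) 1 = checkLoop2 r 2 := by norm_num [checkLoop2, h]
        rw [step, ih2]
        cases r with
        | nil => simp [win, head1, head2]
        | cons b r2 =>
          cases r2 with
          | nil => simp [win, head1, head2, h]
          | cons c r3 =>
            simp only [win, head1, head2, h, decide_true, Bool.true_and]
            cases hb : decide (b ≥ 1) <;> cases hc : decide (c ≥ 1) <;> simp
      · have step : checkLoop2 (a :: r) 2 = true := by norm_num [checkLoop2, h]
        rw [step]; simp [head1, h]
    · have step : ∀ cnt : Int, checkLoop2 (a :: r) cnt = checkLoop2 r 0 := by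
        intro cnt; simp [checkLoop2, h]
      have h1 : head1 (a :: r) = false := by simp [head1, h]
      have h2 : head2 (a :: r) = false := by
        cases r with
        | nil => rfl
        | cons b r2 => simp [head2, h]
      refine ⟨?_, ?_, ?_⟩ <;>
        rw [step, ih0, win_cons_lt a r h] <;> simp [h1, h2]

-- the joined encoding string, as a character list
theorem enc_toList (card : List Int) :
    (PySem.Str.join "" (card.map (fun c => if c ≥ 3 then "3" else if c ≥ 1 then "1" else "0"))).toList
      = card.map encChar := by
  rw [PySem.Str.toList_join]
  have : (card.map (fun c => if c ≥ 3 then "3" else if c ≥ 1 then "1" else "0")).map String.toList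
      = (card.map encChar).map (fun c => [c]) := by
    simp only [List.map_map]
    refine List.map_congr_left ?_
    intro c _
    by_cases h3 : c ≥ 3 <;> by_cases h1 : c ≥ 1 <;>
      simp [encChar, h3, h1]
  rw [this]
  have hnil : ("".toList : List Char) = [] := rfl
  rw [hnil, PySem.Chars.join_nil_singletons]

-- '3' in the encoding ↔ some card ≥ 3
theorem isIn3_eq (card : List Int) :
    PySem.Chars.isIn ['3'] (card.map encChar) = card.any (fun c => decide (c ≥ 3)) := by
  cases h : card.any (fun c => decide (c ≥ 3)) with
  | true =>
    rw [PySem.Chars.isIn_iff_infix]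
    simp only [List.any_eq_true, decide_eq_true_eq] at h
    obtain ⟨c, hc, h3⟩ := h
    have : '3' ∈ card.map encChar := by
      exact List.mem_map.mpr ⟨c, hc, by simp [encChar, h3]⟩
    obtain ⟨l1, l2, heq⟩ := List.append_of_mem this
    exact ⟨l1, l2, by rw [heq]; simp⟩
  | false =>
    rw [PySem.Chars.isIn_eq_false_iff]
    simp only [List.any_eq_false, decide_eq_true_eq] at h
    intro hinf
    have : '3' ∈ card.map encChar := hinf.subset (by simp)
    obtain ⟨c, hc, he⟩ := List.mem_map.mp this
    have h3 : ¬ c ≥ 3 := h c hc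
    by_cases h1 : c ≥ 1 <;> simp [encChar, h3, h1] at he

-- with no card ≥ 3, '111' in the encoding ↔ three consecutive cards ≥ 1
theorem encChar_one_iff (c : Int) (hc3 : ¬ c ≥ 3) : encChar c = '1' ↔ c ≥ 1 := by
  by_cases h1 : c ≥ 1 <;> simp [encChar, hc3, h1]

theorem win_infix (l : List Int) (hl : ∀ c ∈ l, ¬ c ≥ 3) (hw : win l = true) :
    ['1','1','1'] <:+: l.map encChar := by
  induction l using win.induct with
  | case1 a b c r ih =>
    simp only [win, Bool.or_eq_true, Bool.and_eq_true, decide_eq_true_eq] at hw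
    rcases hw with ⟨⟨h1, h2⟩, h3⟩ | hrest
    · refine ⟨[], r.map encChar, ?_⟩
      simp [(encChar_one_iff a (hl a (by simp))).mpr h1,
            (encChar_one_iff b (hl b (by simp))).mpr h2,
            (encChar_one_iff c (hl c (by simp))).mpr h3]
    · have := ih (fun x hx => hl x (by simp only [List.mem_cons] at hx ⊢; tauto)) hrest
      exact this.trans ⟨[encChar a], [], by simp⟩
  | case2 l hpat =>
    match l, hpat with
    | [], _ => simp [win] at hw
    | [a], _ => simp [win] at hw
    | [a, b], _ => simp [win] at hw
    | (a :: b :: c :: r), h => exact (h a b c r rfl).elim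

theorem infix_win (l : List Int) (hl : ∀ c ∈ l, ¬ c ≥ 3)
    (hinf : ['1','1','1'] <:+: l.map encChar) : win l = true := by
  induction l using win.induct with
  | case1 a b c r ih =>
    show ((decide (a ≥ 1) && decide (b ≥ 1) && decide (c ≥ 1)) || win (b :: c :: r)) = true
    rcases List.infix_cons_iff.mp hinf with hpre | htail
    · obtain ⟨ha, hpre⟩ := List.cons_prefix_cons.mp hpre
      obtain ⟨hb, hpre⟩ := List.cons_prefix_cons.mp hpre
      obtain ⟨hc, _⟩ := List.cons_prefix_cons.mp hpre
      simp [(encChar_one_iff a (hl a (by simp))).mp ha.symm,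
            (encChar_one_iff b (hl b (by simp))).mp hb.symm,
            (encChar_one_iff c (hl c (by simp))).mp hc.symm]
    · have := ih (fun x hx => hl x (by simp only [List.mem_cons] at hx ⊢; tauto)) htail
      simp [this]
  | case2 l hpat =>
    exfalso
    have hlen := hinf.length_le
    match l, hpat with
    | [], _ => simp at hlen
    | [a], _ => simp at hlen
    | [a, b], _ => simp at hlen
    | (a :: b :: c :: r), h => exact (h a b c r rfl).elim

theorem isIn111_eq (card : List Int) (h : ∀ c ∈ card, ¬ c ≥ 3) :
    PySem.Chars.isIn ['1','1','1'] (card.map encChar) = win card := by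
  cases hwin : win card with
  | true => rw [PySem.Chars.isIn_iff_infix]; exact win_infix card h hwin
  | false =>
    rw [PySem.Chars.isIn_eq_false_iff]
    intro hinf
    rw [infix_win card h hinf] at hwin
    exact absurd hwin (by simp)

-- ===== VERDICT (by name: the statement is the Claim_ definition above) =====
theorem check_spec : Claim_equal_check := by
  intro card _
  show check card = check_alt card
  unfold check check_alt
  simp only [PySem.Str.isIn_eq]
  have h3l : ("3".toList : List Char) = ['3'] := rfl
  have h111l : ("111".toList : List Char) = ['1','1','1'] := rfl
  rw [enc_toList, checkLoop1_eq_any, (loop2_inv card).1, h3l, h111l, isIn3_eq]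
  cases hany : card.any (fun c => decide (c ≥ 3)) with
  | true => simp
  | false =>
    have h3 : ∀ c ∈ card, ¬ c ≥ 3 := by
      simpa [List.any_eq_false] using hany
    simp [isIn111_eq card h3]
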